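-- pv_equiv track=rewrite | github.com/ClintBaker/advent_of_code | day9/d9.2.py | find_perimeter
-- ===== SOURCE A (Python) =====
-- def find_perimeter(coordinates):
--     x_values_by_row = {}
--     length = len(coordinates)
--     # example: {'row_num': ['x1', 'x2', 'x3']}
--
--     # we are either moving left, right, up or down
--     # define the bounds for each row
--     for i in range(length):
--         a = coordinates[i]
--         b = []
--         # define b based on special cases
--         if i == (length - 1): # last coord special case
--             b = coordinates[0]
--         else:
--             b = coordinates[i + 1]
--
--         # connect to the next coord
--         if a[1] == b[1]: # horizontal connection
--             if a[1] not in x_values_by_row: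
--                 x_values_by_row[a[1]] = []
--             x_values_by_row[a[1]].append(a[0])
--             x_values_by_row[a[1]].append(b[0])
--         else: # vertical connection
--             # push x value to every row in between cur_row and target_row
--             direction = a[1] - b[1] # [7,1] -> [12,1] -> negative = moving down. positive = moving up
--             cur_row = 0
--             target_row = 0
--             if direction > -1: # moving up
--                 cur_row = b[1]
--                 target_row = a[1]
--             else: # moving down
--                 cur_row = a[1]
--                 target_row = b[1]
--             while (cur_row != target_row):
--                 if cur_row not in x_values_by_row:
--                     x_values_by_row[cur_row] = []
--                 x_values_by_row[cur_row].append(a[0])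
--                 cur_row+=1
--     # take x_values_by_row -> only keep largest and smallest for each row ->
--     for row_index, x_values in x_values_by_row.items():
--         x_values_by_row[row_index] = [min(x_values), max(x_values)]
--
--     return x_values_by_row
-- ===== SOURCE B (Python) =====
-- def find_perimeter(coordinates):
--     # Gather/scatter flipped: instead of scattering x-values row by row while
--     # walking edges, compute the row order once, then for each row gather its
--     # min/max directly from the edge list with a coverage test.
--     n = len(coordinates)
--     edges = [(coordinates[i], coordinates[(i + 1) % n]) for i in range(n)]
--
--     def rows_of(a, b):
--         # rows a row-touching walk of this edge would visit, in visit order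
--         if a[1] == b[1]:
--             return [a[1]]
--         return range(min(a[1], b[1]), max(a[1], b[1]))
--
--     def covers(a, b, r):
--         # the x-values this edge contributes to row r
--         if a[1] == b[1]:
--             return [a[0], b[0]] if a[1] == r else []
--         return [a[0]] if min(a[1], b[1]) <= r < max(a[1], b[1]) else []
--
--     order = []
--     seen = set()
--     for a, b in edges:
--         for r in rows_of(a, b):
--             if r not in seen:
--                 seen.add(r)
--                 order.append(r)
--
--     result = {}
--     for r in order:
--         xs = [x for a, b in edges for x in covers(a, b, r)]
--         result[r] = [min(xs), max(xs)]
--     return result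
-- ===== Notes on version B (the rewrite author's own statement) =====
-- stated objective: alternative
-- what changed: B flips A's scatter into a gather: instead of appending x-values row by row into dict lists while walking edges and reducing to min/max afterwards, B builds the edge list once, computes the row order by deduplicating the rows each edge touches, and then for each row computes min/max directly by scanning all edges with an interval-coverage test (no per-edge dict updates, no row-by-row while loop writing values).
import Mathlib
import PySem

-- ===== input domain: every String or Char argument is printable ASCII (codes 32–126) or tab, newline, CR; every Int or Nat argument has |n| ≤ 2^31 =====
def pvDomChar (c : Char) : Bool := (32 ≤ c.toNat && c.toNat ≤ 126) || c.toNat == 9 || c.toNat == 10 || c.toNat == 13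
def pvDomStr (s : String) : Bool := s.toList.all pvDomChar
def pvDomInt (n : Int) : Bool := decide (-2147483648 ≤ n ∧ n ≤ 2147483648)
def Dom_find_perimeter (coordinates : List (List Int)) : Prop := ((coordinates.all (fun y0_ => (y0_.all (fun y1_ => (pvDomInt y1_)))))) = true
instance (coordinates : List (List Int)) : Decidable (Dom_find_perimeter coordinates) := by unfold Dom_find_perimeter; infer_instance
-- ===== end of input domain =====

-- B flips A's per-edge scatter (append x-values into per-row dict lists while walking edges,
-- then reduce each list to min/max) into a per-row gather: row order by dedup of touched rows,
-- then each row's min/max computed directly from the edge list with a coverage test.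


-- ===== PORT A =====

-- body of A's `while (cur_row != target_row)` loop; fuel = target_row - cur_row, the exact
-- number of iterations the Python loop performs (cur_row starts ≤ target_row and counts up by 1)
def pvVloopA (a0 : Int) (cur : Int) (fuel : Nat) (d : PySem.Dict Int (List Int)) :
    PySem.Dict Int (List Int) :=
  match fuel with
  | 0 => d
  | Nat.succ n =>
      let d := if d.contains cur then d else d.insert cur []
      pvVloopA a0 (cur + 1) n (d.modify cur [] (fun xs => xs ++ [a0]))

-- the loop body once `a` and `b` are in hand
def pvEdgeA (d : PySem.Dict Int (List Int)) (a b : List Int) : PySem.Dict Int (List Int) :=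
  match PySem.List.pyGet? a 1, PySem.List.pyGet? b 1, PySem.List.pyGet? a 0 with
  | some a1, some b1, some a0 =>
    if a1 = b1 then
      match PySem.List.pyGet? b 0 with
      | some b0 =>  -- horizontal connection
          let d := if d.contains a1 then d else d.insert a1 []
          let d := d.modify a1 [] (fun xs => xs ++ [a0])
          d.modify a1 [] (fun xs => xs ++ [b0])
      | none => d  -- IndexError: excluded by Pre_
    else  -- vertical connection
      let direction := a1 - b1
      let cr := if direction > -1 then (b1, a1) else (a1, b1)  -- (cur_row, target_row)
      pvVloopA a0 cr.1 (cr.2 - cr.1).toNat d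
  | _, _, _ => d  -- IndexError: excluded by Pre_

def pvBodyA (coordinates : List (List Int)) (length : Int) (d : PySem.Dict Int (List Int))
    (i : Int) : PySem.Dict Int (List Int) :=
  match PySem.List.pyGet? coordinates i with
  | none => d  -- unreachable: i ∈ range(length)
  | some a =>
      let b : List Int :=
        if i = length - 1 then (PySem.List.pyGet? coordinates 0).getD []
        else (PySem.List.pyGet? coordinates (i + 1)).getD []
      pvEdgeA d a b

def find_perimeter (coordinates : List (List Int)) : List (Int × List Int) :=
  let length : Int := (coordinates.length : Int)
  let d := (PySem.List.pyRange 0 length).foldl (pvBodyA coordinates length) PySem.Dict.empty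
  -- `for row_index, x_values in x_values_by_row.items(): ... = [min(x_values), max(x_values)]`
  let d2 := d.items.foldl (fun acc p =>
      match PySem.List.min? p.2 (fun y => y), PySem.List.max? p.2 (fun y => y) with
      | some lo, some hi => acc.insert p.1 [lo, hi]
      | _, _ => acc  -- ValueError on min([]): unreachable, every stored list is nonempty
      ) d
  d2.items

-- ===== PORT B =====

-- `rows_of(a, b)`: the rows a row-touching walk of this edge would visit, in order
def pvRowsOf (a b : List Int) : List Int :=
  match PySem.List.pyGet? a 1, PySem.List.pyGet? b 1 with
  | some a1, some b1 =>
      if a1 = b1 then [a1] else PySem.List.pyRange (min a1 b1) (max a1 b1)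
  | _, _ => []  -- IndexError: excluded by Pre_

-- `covers(a, b, r)`: the x-values this edge contributes to row r
def pvCovers (a b : List Int) (r : Int) : List Int :=
  match PySem.List.pyGet? a 1, PySem.List.pyGet? b 1 with
  | some a1, some b1 =>
      if a1 = b1 then
        if a1 = r then
          [(PySem.List.pyGet? a 0).getD 0, (PySem.List.pyGet? b 0).getD 0]
        else []
      else
        if min a1 b1 ≤ r ∧ r < max a1 b1 then [(PySem.List.pyGet? a 0).getD 0] else []
  | _, _ => []  -- IndexError: excluded by Pre_

def find_perimeter_alt (coordinates : List (List Int)) : List (Int × List Int) :=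
  let n : Int := (coordinates.length : Int)
  let edges := (PySem.List.pyRange 0 n).map (fun i =>
    ((PySem.List.pyGet? coordinates i).getD [],
     (PySem.List.pyGet? coordinates (PySem.Int.mod (i + 1) n)).getD []))
  -- first-touch row order, via a seen-set
  let order := (edges.foldl (fun (st : List Int × PySem.Set Int) e =>
      (pvRowsOf e.1 e.2).foldl (fun st r =>
        if PySem.Set.contains st.2 r then st else (st.1 ++ [r], PySem.Set.add st.2 r)) st)
    ([], PySem.Set.ofList [])).1
  -- per row: gather covering x-values from the edge list, keep [min, max]
  (order.foldl (fun (d : PySem.Dict Int (List Int)) r =>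
      let xs := edges.flatMap (fun e => pvCovers e.1 e.2 r)
      match PySem.List.min? xs (fun y => y), PySem.List.max? xs (fun y => y) with
      | some lo, some hi => d.insert r [lo, hi]
      | _, _ => d  -- ValueError on min([]): unreachable, every ordered row is covered
    ) PySem.Dict.empty).items

-- ===== PRECONDITION & SPEC =====
-- Pre_ excludes exactly the inputs on which A raises IndexError: some coordinate has fewer
-- than two components (A reads a[0] and a[1] of every coordinate).
def Pre_find_perimeter (coordinates : List (List Int)) : Prop :=
  ∀ y ∈ coordinates, 2 ≤ y.length
instance (coordinates : List (List Int)) : Decidable (Pre_find_perimeter coordinates) := by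
  unfold Pre_find_perimeter; infer_instance

def pvWitness_find_perimeter : List (List Int) := [[0, 0], [3, 0], [3, 2], [0, 2]]

def Spec_find_perimeter (coordinates : List (List Int)) (out : List (Int × List Int)) : Prop := out = find_perimeter_alt coordinates
instance (coordinates : List (List Int)) (out : List (Int × List Int)) : Decidable (Spec_find_perimeter coordinates out) := by unfold Spec_find_perimeter; infer_instance

-- ===== CLAIM (what is proved, stated in full; the proofs are below) =====
def Claim_equal_find_perimeter : Prop := ∀ (coordinates : List (List Int)), Dom_find_perimeter coordinates → Pre_find_perimeter coordinates → Spec_find_perimeter coordinates (find_perimeter coordinates)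

-- ===== LEMMAS AND PROOFS =====

-- the (row, x) event stream of one edge, and selection of a row's x-values from it
def pvEv (a0 a1 b0 b1 : Int) : List (Int × Int) :=
  if a1 = b1 then [(a1, a0), (a1, b0)]
  else (PySem.List.pyRange (min a1 b1) (max a1 b1)).map (fun r => (r, a0))

def pvEvE (e : List Int × List Int) : List (Int × Int) :=
  pvEv ((PySem.List.pyGet? e.1 0).getD 0) ((PySem.List.pyGet? e.1 1).getD 0)
       ((PySem.List.pyGet? e.2 0).getD 0) ((PySem.List.pyGet? e.2 1).getD 0)

def pvSel (l : List (Int × Int)) (r : Int) : List Int :=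
  (l.filter (fun p => p.1 == r)).map (fun p => p.2)

def pvStep (d : PySem.Dict Int (List Int)) (p : Int × Int) : PySem.Dict Int (List Int) :=
  d.modify p.1 [] (fun xs => xs ++ [p.2])

def pvEdges (cs : List (List Int)) : List (List Int × List Int) :=
  (List.range cs.length).map (fun j => (cs.getD j [], cs.getD ((j + 1) % cs.length) []))

def pvMn (l : List Int) : Int := match l with | [] => 0 | h :: t => t.foldl min h

def pvMx (l : List Int) : Int := match l with | [] => 0 | h :: t => t.foldl max h

def pvG (p : Int × List Int) : Int × List Int := (p.1, [pvMn p.2, pvMx p.2])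

def pvInv (d : PySem.Dict Int (List Int)) : Prop := d.keys.Nodup ∧ ∀ p ∈ d.items, p.2 ≠ []

def pvReduce (d : PySem.Dict Int (List Int)) : PySem.Dict Int (List Int) := ⟨d.items.map pvG⟩

theorem pvGet1 (x y : Int) (t : List Int) : PySem.List.pyGet? (x :: y :: t) 1 = some y := by
  rw [show (1 : Int) = ((1 : Nat) : Int) from rfl, PySem.List.pyGet?_natCast]; rfl

theorem pvGet0 (x : Int) (t : List Int) : PySem.List.pyGet? (x :: t) 0 = some x := by
  rw [show (0 : Int) = ((0 : Nat) : Int) from rfl, PySem.List.pyGet?_natCast]; rfl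

theorem pvGetSome (cs : List (List Int)) (j : Nat) (h : j < cs.length) :
    PySem.List.pyGet? cs ((j : Nat) : Int) = some (cs.getD j []) := by
  rw [PySem.List.pyGet?_natCast, List.getElem?_eq_getElem h, List.getD_eq_getElem cs [] h]

theorem pvEA_eq_modify (d : PySem.Dict Int (List Int)) (k x : Int) :
    (if d.contains k then d else d.insert k []).modify k [] (fun xs => xs ++ [x])
      = d.modify k [] (fun xs => xs ++ [x]) := by
  by_cases h : d.contains k
  · simp [h]
  · simp only [h, Bool.false_eq_true, ite_false]
    unfold PySem.Dict.modify
    simp [PySem.Dict.getD_insert_self, PySem.Dict.insert_insert_self,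
      PySem.Dict.getD_of_not_contains d [] (by simpa using h)]

theorem pvVloopA_eq (a0 : Int) : ∀ (fuel : Nat) (cur : Int) (d : PySem.Dict Int (List Int)),
    pvVloopA a0 cur fuel d
      = ((PySem.List.pyRange cur (cur + fuel)).map (fun r => (r, a0))).foldl pvStep d := by
  intro fuel
  induction fuel with
  | zero =>
      intro cur d
      rw [show (cur + ((0 : Nat) : Int)) = cur by simp,
        PySem.List.pyRange_one_eq_nil (le_refl cur)]
      rfl
  | succ n ih =>
      intro cur d
      have hlt : cur < cur + ((Nat.succ n : Nat) : Int) := by omega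
      rw [PySem.List.pyRange_one_cons hlt,
        show cur + ((Nat.succ n : Nat) : Int) = (cur + 1) + (n : Int) by push_cast; ring]
      show pvVloopA a0 (cur+1) n ((if d.contains cur then d else d.insert cur []).modify cur [] (fun xs => xs ++ [a0])) = _
      rw [pvEA_eq_modify, ih]
      rfl

theorem pvEdgeA_eq (d : PySem.Dict Int (List Int)) (a b : List Int)
    (ha : 2 ≤ a.length) (hb : 2 ≤ b.length) :
    pvEdgeA d a b = (pvEvE (a, b)).foldl pvStep d := by
  obtain ⟨a0, a1, ar, rfl⟩ : ∃ a0 a1 t, a = a0 :: a1 :: t := by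
    rcases a with _ | ⟨a0, _ | ⟨a1, t⟩⟩ <;> simp at ha ⊢
  obtain ⟨b0, b1, br, rfl⟩ : ∃ b0 b1 t, b = b0 :: b1 :: t := by
    rcases b with _ | ⟨b0, _ | ⟨b1, t⟩⟩ <;> simp at hb ⊢
  unfold pvEdgeA pvEvE pvEv
  rw [pvGet1, pvGet1, pvGet0, pvGet0]
  simp only [Option.getD_some]
  by_cases h1 : a1 = b1
  · simp only [h1, if_pos]
    rw [pvEA_eq_modify]
    rfl
  · simp only [h1, ite_false]
    by_cases h2 : a1 - b1 > -1
    · have hle : b1 ≤ a1 := by omega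
      simp only [h2, if_pos]
      rw [pvVloopA_eq, min_eq_right hle, max_eq_left hle,
        show b1 + ((a1 - b1).toNat : Int) = a1 by omega]
    · have hle : a1 ≤ b1 := by omega
      simp only [h2, ite_false]
      rw [pvVloopA_eq, min_eq_left hle, max_eq_right hle,
        show a1 + ((b1 - a1).toNat : Int) = b1 by omega]

theorem pvFoldFlat (es : List (List Int × List Int)) :
    ∀ d : PySem.Dict Int (List Int),
    es.foldl (fun d e => (pvEvE e).foldl pvStep d) d = (es.flatMap pvEvE).foldl pvStep d := by
  induction es with
  | nil => intro d; rfl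
  | cons e t ih => intro d; rw [List.flatMap_cons, List.foldl_append, List.foldl_cons, ih]

theorem pvAfold (cs : List (List Int)) (h : ∀ y ∈ cs, 2 ≤ y.length) :
    (PySem.List.pyRange 0 ((cs.length : Nat) : Int)).foldl
        (pvBodyA cs ((cs.length : Nat) : Int)) PySem.Dict.empty
      = ((pvEdges cs).flatMap pvEvE).foldl pvStep PySem.Dict.empty := by
  rw [← pvFoldFlat, PySem.List.pyRange_zero_natCast, List.foldl_map]
  unfold pvEdges
  rw [List.foldl_map]
  apply PySem.List.foldl_congr_mem
  intro acc j hj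
  rw [List.mem_range] at hj
  have hmem : cs.getD j [] ∈ cs := by
    rw [List.getD_eq_getElem cs [] hj]; exact List.getElem_mem _
  have hmem2 : cs.getD ((j + 1) % cs.length) [] ∈ cs := by
    have : (j + 1) % cs.length < cs.length := Nat.mod_lt _ (by omega)
    rw [List.getD_eq_getElem cs [] this]; exact List.getElem_mem _
  unfold pvBodyA
  rw [pvGetSome cs j hj]
  by_cases hlast : j = cs.length - 1
  · have : ((j : Nat) : Int) = ((cs.length : Nat) : Int) - 1 := by omega
    have hmod : (j + 1) % cs.length = 0 := by
      rw [show j + 1 = cs.length by omega, Nat.mod_self]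
    rw [if_pos this, show (0 : Int) = ((0 : Nat) : Int) from rfl, pvGetSome cs 0 (by omega), hmod]
    show pvEdgeA acc (cs.getD j []) (cs.getD 0 []) = _
    exact pvEdgeA_eq _ _ _ (h _ hmem) (h _ (by rwa [hmod] at hmem2))
  · have hne : ((j : Nat) : Int) ≠ ((cs.length : Nat) : Int) - 1 := by omega
    have hmod : (j + 1) % cs.length = j + 1 := Nat.mod_eq_of_lt (by omega)
    rw [if_neg hne, show ((j : Nat) : Int) + 1 = ((j + 1 : Nat) : Int) by push_cast; ring,
      pvGetSome cs (j + 1) (by omega), hmod]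
    show pvEdgeA acc (cs.getD j []) (cs.getD (j + 1) []) = _
    exact pvEdgeA_eq _ _ _ (h _ hmem) (h _ (by rwa [hmod] at hmem2))

theorem pvDgetD (ev : List (Int × Int)) (r : Int) :
    (ev.foldl pvStep PySem.Dict.empty).getD r [] = pvSel ev r := by
  show (ev.foldl (fun d p => d.modify p.1 [] (fun xs => xs ++ [p.2])) PySem.Dict.empty).getD r [] = _
  rw [PySem.Dict.getD_foldl_modify_append]
  simp [pvSel]

theorem pvDkeys (ev : List (Int × Int)) :
    (ev.foldl pvStep PySem.Dict.empty).keys = PySem.Set.ofList (ev.map Prod.fst) := by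
  show (ev.foldl (fun d p => d.modify p.1 [] (fun xs => xs ++ [p.2])) PySem.Dict.empty).keys = _
  rw [PySem.Dict.keys_foldl_modify_key]
  rw [PySem.Set.ofList_eq_foldl]
  rfl

theorem pvDnodup (ev : List (Int × Int)) :
    (ev.foldl pvStep PySem.Dict.empty).keys.Nodup := by
  show (ev.foldl (fun d p => d.modify p.1 [] (fun xs => xs ++ [p.2])) PySem.Dict.empty).keys.Nodup
  exact PySem.Dict.nodup_keys_foldl_modify_key _ _ _ _ _ PySem.Dict.nodup_keys_empty

theorem pvSel_append (l1 l2 : List (Int × Int)) (r : Int) :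
    pvSel (l1 ++ l2) r = pvSel l1 r ++ pvSel l2 r := by
  simp [pvSel]

theorem pvSel_flatMap (es : List (List Int × List Int)) (r : Int) :
    pvSel (es.flatMap pvEvE) r = es.flatMap (fun e => pvSel (pvEvE e) r) := by
  induction es with
  | nil => rfl
  | cons e t ih => rw [List.flatMap_cons, pvSel_append, ih, List.flatMap_cons]

theorem pvRangeFilter (c : Int) : ∀ (n : Nat) (lo : Int),
    (PySem.List.pyRange lo (lo + n)).filter (fun r => r == c)
      = if lo ≤ c ∧ c < lo + n then [c] else [] := by
  intro n
  induction n with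
  | zero =>
      intro lo
      rw [show lo + ((0:Nat):Int) = lo by simp, PySem.List.pyRange_one_eq_nil (le_refl lo)]
      rw [if_neg (by omega)]
      rfl
  | succ m ih =>
      intro lo
      rw [show lo + ((Nat.succ m : Nat) : Int) = (lo + 1) + (m : Int) by push_cast; ring,
        PySem.List.pyRange_one_cons (by omega), List.filter_cons]
      by_cases hc : lo = c
      · subst hc
        have h0 : ¬ (lo + 1 ≤ lo ∧ lo < lo + 1 + (m:Int)) := by omega
        have h1 : lo ≤ lo ∧ lo < lo + 1 + (m:Int) := by omega
        rw [ih (lo + 1), if_neg h0, if_pos h1]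
        simp
      · rw [show (lo == c) = false by simp [hc], ih (lo + 1)]
        have h2 : (lo + 1 ≤ c ∧ c < lo + 1 + (m:Int)) ↔ (lo ≤ c ∧ c < lo + 1 + (m:Int)) := by omega
        simp only [h2, Bool.false_eq_true, if_false]

theorem pvSel_range (lo hi x c : Int) :
    pvSel ((PySem.List.pyRange lo hi).map (fun r => (r, x))) c
      = if lo ≤ c ∧ c < hi then [x] else [] := by
  by_cases hlh : lo ≤ hi
  · obtain ⟨n, hn⟩ : ∃ n : Nat, hi = lo + n := ⟨(hi - lo).toNat, by omega⟩
    subst hn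
    unfold pvSel
    rw [List.filter_map]
    rw [show ((fun p : Int × Int => p.1 == c) ∘ (fun r => (r, x))) = (fun r : Int => r == c) from rfl,
      pvRangeFilter c n lo]
    by_cases h : lo ≤ c ∧ c < lo + (n:Int)
    · rw [if_pos h, if_pos h]; rfl
    · rw [if_neg h, if_neg h]; rfl
  · rw [PySem.List.pyRange_one_eq_nil (by omega), if_neg (by omega)]
    rfl

theorem pvCovers_eq_sel (a b : List Int) (r : Int)
    (ha : 2 ≤ a.length) (hb : 2 ≤ b.length) :
    pvCovers a b r = pvSel (pvEvE (a, b)) r := by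
  obtain ⟨a0, a1, ar, rfl⟩ : ∃ a0 a1 t, a = a0 :: a1 :: t := by
    rcases a with _ | ⟨a0, _ | ⟨a1, t⟩⟩ <;> simp at ha ⊢
  obtain ⟨b0, b1, br, rfl⟩ : ∃ b0 b1 t, b = b0 :: b1 :: t := by
    rcases b with _ | ⟨b0, _ | ⟨b1, t⟩⟩ <;> simp at hb ⊢
  unfold pvCovers pvEvE pvEv
  rw [pvGet1, pvGet1, pvGet0, pvGet0]
  simp only [Option.getD_some]
  by_cases h1 : a1 = b1
  · simp only [h1, if_pos]
    by_cases h2 : b1 = r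
    · subst h2
      simp [pvSel]
    · rw [if_neg h2]
      simp [pvSel, h2]
  · simp only [h1, ite_false]
    rw [pvSel_range]

-- first-touch order: a seen-set loop over a list of rows equals PySem.Set.update

theorem pvSel_ne_nil (ev : List (Int × Int)) (k : Int) (h : k ∈ ev.map Prod.fst) :
    pvSel ev k ≠ [] := by
  obtain ⟨q, hq, rfl⟩ := List.mem_map.1 h
  unfold pvSel
  intro hcon
  have : q ∈ ev.filter (fun p => p.1 == q.1) := List.mem_filter.2 ⟨hq, by simp⟩
  rw [List.map_eq_nil_iff.1 hcon] at this
  simp at this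

theorem pvOrdLoop (l : List Int) : ∀ (s : PySem.Set Int),
    (l.foldl (fun st r =>
        if PySem.Set.contains st.2 r then st else (st.1 ++ [r], PySem.Set.add st.2 r)) (s, s))
      = (PySem.Set.update s l, PySem.Set.update s l) := by
  induction l with
  | nil => intro s; rfl
  | cons r t ih =>
      intro s
      rw [List.foldl_cons]
      by_cases h : PySem.Set.contains s r
      · rw [if_pos h]
        rw [ih s]
        have : PySem.Set.add s r = s := by simp [PySem.Set.add, List.mem_of_elem_eq_true h]
        show _ = (PySem.Set.update s (r :: t), _)
        simp [PySem.Set.update, List.foldl_cons, this]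
      · rw [if_neg h]
        have : PySem.Set.add s r = s ++ [r] := by
          have hm : r ∉ s := fun hm => h (List.elem_eq_true_of_mem hm)
          simp [PySem.Set.add, hm]
        rw [this, ← this, ih (PySem.Set.add s r)]
        show _ = (PySem.Set.update s (r :: t), _)
        simp [PySem.Set.update, List.foldl_cons]

theorem pvRows_update (a b : List Int) (ha : 2 ≤ a.length) (hb : 2 ≤ b.length)
    (s : PySem.Set Int) :
    PySem.Set.update s (pvRowsOf a b) = PySem.Set.update s ((pvEvE (a, b)).map Prod.fst) := by
  obtain ⟨a0, a1, ar, rfl⟩ : ∃ a0 a1 t, a = a0 :: a1 :: t := by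
    rcases a with _ | ⟨a0, _ | ⟨a1, t⟩⟩ <;> simp at ha ⊢
  obtain ⟨b0, b1, br, rfl⟩ : ∃ b0 b1 t, b = b0 :: b1 :: t := by
    rcases b with _ | ⟨b0, _ | ⟨b1, t⟩⟩ <;> simp at hb ⊢
  unfold pvRowsOf pvEvE pvEv
  rw [pvGet1, pvGet1, pvGet0, pvGet0]
  simp only [Option.getD_some]
  by_cases h1 : a1 = b1
  · simp only [h1, if_pos]
    show PySem.Set.update s [b1] = PySem.Set.update s [b1, b1]
    simp [PySem.Set.update, List.foldl_cons]
  · simp only [h1, ite_false, List.map_map]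
    congr 1
    exact (List.map_id _).symm ▸ (by simp)

theorem pvOrdEdges (es : List (List Int × List Int))
    (hes : ∀ e ∈ es, 2 ≤ e.1.length ∧ 2 ≤ e.2.length) : ∀ (s : PySem.Set Int),
    (es.foldl (fun st e =>
        (pvRowsOf e.1 e.2).foldl (fun st r =>
          if PySem.Set.contains st.2 r then st else (st.1 ++ [r], PySem.Set.add st.2 r)) st)
      (s, s))
    = (PySem.Set.update s ((es.flatMap pvEvE).map Prod.fst),
       PySem.Set.update s ((es.flatMap pvEvE).map Prod.fst)) := by
  induction es with
  | nil => intro s; rfl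
  | cons e t ih =>
      intro s
      rw [List.foldl_cons, pvOrdLoop,
        pvRows_update e.1 e.2 (hes e (by simp)).1 (hes e (by simp)).2,
        ih (fun q hq => hes q (by simp [hq]))]
      have : ∀ l1 l2 : List Int, PySem.Set.update s (l1 ++ l2)
          = PySem.Set.update (PySem.Set.update s l1) l2 := by
        intro l1 l2; simp [PySem.Set.update, List.foldl_append]
      rw [List.flatMap_cons, List.map_append, this]

theorem items_pvReduce (d : PySem.Dict Int (List Int)) : (pvReduce d).items = d.items.map pvG := rfl

theorem pvFoldInsert : ∀ (l pre : List (Int × List Int)) (G : Int × List Int → List Int),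
    ((pre ++ l).map (fun q => q.1)).Nodup →
    (l.foldl (fun acc p => acc.insert p.1 (G p))
        (⟨pre.map (fun p => (p.1, G p)) ++ l⟩ : PySem.Dict Int (List Int))).items
      = (pre ++ l).map (fun p => (p.1, G p)) := by
  intro l
  induction l with
  | nil => intro pre G _; simp
  | cons p t ih =>
      intro pre G hnd
      have hne : ∀ q ∈ pre.map (fun p => (p.1, G p)) ++ t, q.1 ≠ p.1 := by
        intro q hq
        rw [List.map_append, List.map_cons] at hnd
        rcases List.mem_append.1 hq with hq1 | hq2
        · obtain ⟨r, hr, rfl⟩ := List.mem_map.1 hq1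
          intro hcontra
          have hdisj := (List.nodup_append.1 hnd).2.2
          exact hdisj r.1 (List.mem_map.2 ⟨r, hr, rfl⟩) p.1 (by simp) hcontra
        · intro hcontra
          have h2 := (List.nodup_append.1 hnd).2.1
          rw [List.nodup_cons] at h2
          exact h2.1 (List.mem_map.2 ⟨q, hq2, hcontra⟩)
      have hcont : (⟨pre.map (fun p => (p.1, G p)) ++ p :: t⟩ :
          PySem.Dict Int (List Int)).contains p.1 = true := by
        simp [PySem.Dict.contains]
      have hins : (⟨pre.map (fun p => (p.1, G p)) ++ p :: t⟩ :
            PySem.Dict Int (List Int)).insert p.1 (G p)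
          = ⟨(pre ++ [p]).map (fun p => (p.1, G p)) ++ t⟩ := by
        apply PySem.Dict.ext
        rw [PySem.Dict.items_insert_of_contains _ _ hcont]
        have h1 : (pre.map (fun p => (p.1, G p))).map
            (fun q => if (q.1 == p.1) = true then (p.1, G p) else q)
            = pre.map (fun p => (p.1, G p)) := by
          rw [List.map_map]
          apply List.map_congr_left
          intro q hq
          have := hne (q.1, G q) (List.mem_append_left _ (List.mem_map.2 ⟨q, hq, rfl⟩))
          simp only [Function.comp_apply]
          rw [if_neg (by simpa using this)]
        have h3 : t.map (fun q => if (q.1 == p.1) = true then (p.1, G p) else q) = t := by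
          refine (List.map_congr_left (fun q hq => ?_)).trans (List.map_id t)
          have := hne q (List.mem_append_right _ hq)
          rw [if_neg (by simpa using this)]
          rfl
        show (pre.map (fun p => (p.1, G p)) ++ p :: t).map
            (fun q => if (q.1 == p.1) = true then (p.1, G p) else q) = _
        rw [List.map_append, List.map_cons, h1, h3, if_pos (by simp), List.map_append]
        simp
      rw [List.foldl_cons, hins, ih (pre ++ [p]) G (by rwa [List.append_assoc, List.singleton_append])]
      rw [List.append_assoc, List.singleton_append]

theorem pvFinalize (d : PySem.Dict Int (List Int)) (hd : pvInv d) :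
    (d.items.foldl (fun acc p =>
      match PySem.List.min? p.2 (fun y => y), PySem.List.max? p.2 (fun y => y) with
      | some lo, some hi => acc.insert p.1 [lo, hi]
      | _, _ => acc) d).items = (pvReduce d).items := by
  have hcong : d.items.foldl (fun acc p =>
      match PySem.List.min? p.2 (fun y => y), PySem.List.max? p.2 (fun y => y) with
      | some lo, some hi => acc.insert p.1 [lo, hi]
      | _, _ => acc) d
      = d.items.foldl (fun acc p => acc.insert p.1 [pvMn p.2, pvMx p.2]) d := by
    apply PySem.List.foldl_congr_mem
    intro acc p hp
    obtain ⟨h, t, hpt⟩ := List.exists_cons_of_ne_nil (hd.2 p hp)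
    rw [hpt, PySem.List.min?_id_cons, PySem.List.max?_id_cons]
    rfl
  rw [hcong]
  have hd' : d = ⟨([] : List (Int × List Int)).map (fun p => (p.1, [pvMn p.2, pvMx p.2])) ++ d.items⟩ := by
    apply PySem.Dict.ext; simp
  calc (d.items.foldl (fun acc p => acc.insert p.1 [pvMn p.2, pvMx p.2]) d).items
      = (d.items.foldl (fun acc p => acc.insert p.1 [pvMn p.2, pvMx p.2])
          (⟨([] : List (Int × List Int)).map (fun p => (p.1, [pvMn p.2, pvMx p.2])) ++ d.items⟩ :
            PySem.Dict Int (List Int))).items := by rw [← hd']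
    _ = (([] : List (Int × List Int)) ++ d.items).map (fun p => (p.1, [pvMn p.2, pvMx p.2])) :=
        pvFoldInsert d.items [] _ (by simpa [PySem.Dict.keys] using hd.1)
    _ = (pvReduce d).items := by rw [items_pvReduce]; simp [pvG]

theorem pvCoversFlat (es : List (List Int × List Int))
    (hes : ∀ e ∈ es, 2 ≤ e.1.length ∧ 2 ≤ e.2.length) (r : Int) :
    es.flatMap (fun e => pvCovers e.1 e.2 r) = pvSel (es.flatMap pvEvE) r := by
  rw [pvSel_flatMap]
  induction es with
  | nil => rfl
  | cons e t ih =>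
      rw [List.flatMap_cons, List.flatMap_cons,
        pvCovers_eq_sel e.1 e.2 r (hes e (by simp)).1 (hes e (by simp)).2,
        ih (fun q hq => hes q (by simp [hq]))]

theorem pvEdgesLen (cs : List (List Int)) (h : ∀ y ∈ cs, 2 ≤ y.length) :
    ∀ e ∈ pvEdges cs, 2 ≤ e.1.length ∧ 2 ≤ e.2.length := by
  intro e he
  obtain ⟨j, hj, rfl⟩ := List.mem_map.1 he
  rw [List.mem_range] at hj
  constructor
  · exact h _ (by rw [List.getD_eq_getElem cs [] hj]; exact List.getElem_mem _)
  · have : (j + 1) % cs.length < cs.length := Nat.mod_lt _ (by omega)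
    exact h _ (by rw [List.getD_eq_getElem cs [] this]; exact List.getElem_mem _)

theorem pvBedges (cs : List (List Int)) :
    (PySem.List.pyRange 0 ((cs.length : Nat) : Int)).map (fun i =>
      ((PySem.List.pyGet? cs i).getD [],
       (PySem.List.pyGet? cs (PySem.Int.mod (i + 1) ((cs.length : Nat) : Int))).getD []))
    = pvEdges cs := by
  rw [PySem.List.pyRange_zero_natCast, List.map_map]
  apply List.map_congr_left
  intro j hj
  rw [List.mem_range] at hj
  simp only [Function.comp_apply]
  rw [pvGetSome cs j hj,
    show ((j : Nat) : Int) + 1 = ((j + 1 : Nat) : Int) by push_cast; ring,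
    PySem.Int.mod_natCast,
    pvGetSome cs ((j + 1) % cs.length) (Nat.mod_lt _ (by omega))]
  rfl

theorem pvMain (cs : List (List Int)) (hpre : ∀ y ∈ cs, 2 ≤ y.length) :
    find_perimeter cs = find_perimeter_alt cs := by
  have hes := pvEdgesLen cs hpre
  set es := pvEdges cs with hes_def
  set ev := es.flatMap pvEvE with hev_def
  set D := ev.foldl pvStep PySem.Dict.empty with hD_def
  have hnd : D.keys.Nodup := pvDnodup ev
  have hkeys : D.keys = PySem.Set.ofList (ev.map Prod.fst) := pvDkeys ev
  have hitems : D.items = D.keys.map (fun k => (k, D.getD k [])) :=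
    PySem.Dict.items_eq_map_keys D hnd []
  have hinv : pvInv D := by
    refine ⟨hnd, ?_⟩
    intro p hp
    rw [hitems] at hp
    obtain ⟨k, hk, rfl⟩ := List.mem_map.1 hp
    rw [hkeys] at hk
    have hk' : k ∈ ev.map Prod.fst := (PySem.Set.mem_ofList _ _).1 hk
    have hgd : D.getD k [] = pvSel ev k := by rw [hD_def]; exact pvDgetD ev k
    simpa [hgd] using pvSel_ne_nil ev k hk'
  -- A side
  have hA : find_perimeter cs
      = D.keys.map (fun k => (k, [pvMn (pvSel ev k), pvMx (pvSel ev k)])) := by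
    unfold find_perimeter
    simp only []
    rw [pvAfold cs hpre, ← hev_def, ← hD_def, pvFinalize D hinv, items_pvReduce]
    rw [hitems, List.map_map]
    apply List.map_congr_left
    intro k hk
    have hgd : D.getD k [] = pvSel ev k := by rw [hD_def]; exact pvDgetD ev k
    simp only [Function.comp_apply, pvG, hgd]
  -- B side
  have hB : find_perimeter_alt cs
      = (PySem.Set.ofList (ev.map Prod.fst)).map
          (fun k => (k, [pvMn (pvSel ev k), pvMx (pvSel ev k)])) := by
    unfold find_perimeter_alt
    simp only []
    rw [pvBedges cs, ← hes_def]
    rw [show (([] : List Int), PySem.Set.ofList ([] : List Int))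
        = ((PySem.Set.ofList ([] : List Int) : PySem.Set Int), (PySem.Set.ofList ([] : List Int) : PySem.Set Int)) from rfl]
    rw [pvOrdEdges es hes]
    have hupd : PySem.Set.update (PySem.Set.ofList ([] : List Int)) ((es.flatMap pvEvE).map Prod.fst)
        = PySem.Set.ofList (ev.map Prod.fst) := by
      rw [PySem.Set.ofList_eq_foldl]; rfl
    rw [hupd]
    set K := PySem.Set.ofList (ev.map Prod.fst) with hK_def
    have hKnd : K.Nodup := PySem.Set.nodup_ofList _
    have hcong : K.foldl (fun (d : PySem.Dict Int (List Int)) r =>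
        let xs := es.flatMap (fun e => pvCovers e.1 e.2 r)
        match PySem.List.min? xs (fun y => y), PySem.List.max? xs (fun y => y) with
        | some lo, some hi => d.insert r [lo, hi]
        | _, _ => d) PySem.Dict.empty
        = K.foldl (fun d r => d.insert r [pvMn (pvSel ev r), pvMx (pvSel ev r)]) PySem.Dict.empty := by
      apply PySem.List.foldl_congr_mem
      intro d r hr
      have hxs : es.flatMap (fun e => pvCovers e.1 e.2 r) = pvSel ev r := pvCoversFlat es hes r
      have hne : pvSel ev r ≠ [] :=
        pvSel_ne_nil ev r ((PySem.Set.mem_ofList _ _).1 (hK_def ▸ hr))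
      obtain ⟨h, t, hpt⟩ := List.exists_cons_of_ne_nil hne
      simp only [hxs, hpt, PySem.List.min?_id_cons, PySem.List.max?_id_cons]
      rfl
    rw [hcong,
      PySem.Dict.items_foldl_insert_fresh K (fun r => r)
        (fun r => [pvMn (pvSel ev r), pvMx (pvSel ev r)]) PySem.Dict.empty
        (fun a _ => PySem.Dict.contains_empty a) (by simpa using hKnd)]
    simp [PySem.Dict.empty]
  rw [hA, hB, hkeys]

-- ===== VERDICT (by name: the statement is the Claim_ definition above) =====
theorem find_perimeter_spec : Claim_equal_find_perimeter := by
  intro coordinates _ hpre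
  unfold Spec_find_perimeter
  exact pvMain coordinates hpre
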